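-- pv_equiv track=rewrite | github.com/aboutroots/aoc2023 | day14.py | move_stones_right
-- ===== SOURCE A (Python) =====
-- def move_stones_right(row):
--     """Try moving as far right as possible, starting with the rightmost stone"""
--
--     length = len(row)
--     for index_from_start in range(length):
--         # go backwards
--         index = length - index_from_start - 1
--         elem = row[index]
--         is_last_element = index == length - 1
--         if elem == "O" and not is_last_element:
--             next_possible_index = index
--             for i in range(index + 1, length):
--                 if row[i] == ".":
--                     next_possible_index = i
--                 else:
--                     break
--             if next_possible_index != index:
--                 # swap the stone with the empty space
--                 row[index], row[next_possible_index] = (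
--                     row[next_possible_index],
--                     row[index],
--                 )
--     return row
-- ===== SOURCE B (Python) =====
-- def move_stones_right(row):
--     """Single right-to-left pass: c counts the free '.' run just right of i."""
--     c = 0
--     for i in range(len(row) - 1, -1, -1):
--         e = row[i]
--         if e == ".":
--             c += 1
--         elif e == "O" and c > 0:
--             row[i] = "."
--             row[i + c] = "O"
--         else:
--             c = 0
--     return row
-- ===== Notes on version B (the rewrite author's own statement) =====
-- stated objective: alternative
-- what changed: Replaced the per-stone inner scan over the dot run by a single right-to-left pass that maintains a counter of the free '.' run immediately to the right, moving each 'O' in O(1) (asymptotically O(n) vs A's O(n^2) worst case; not measurably faster on the generated inputs).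
import Mathlib
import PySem

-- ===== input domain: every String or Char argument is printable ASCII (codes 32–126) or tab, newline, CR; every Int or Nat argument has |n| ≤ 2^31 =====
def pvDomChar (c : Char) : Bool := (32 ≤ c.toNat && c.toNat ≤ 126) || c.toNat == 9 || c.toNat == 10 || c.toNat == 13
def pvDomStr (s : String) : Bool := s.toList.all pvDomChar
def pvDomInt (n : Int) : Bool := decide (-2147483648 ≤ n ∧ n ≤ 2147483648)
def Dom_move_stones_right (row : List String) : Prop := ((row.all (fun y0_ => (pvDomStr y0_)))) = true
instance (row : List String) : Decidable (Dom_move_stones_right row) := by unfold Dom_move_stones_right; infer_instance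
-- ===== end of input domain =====

-- B replaces A's per-stone inner scan by one right-to-left pass with a free-'.'-run counter;
-- both Pythons mutate `row` in place identically; the theorems are about the returned value.

-- ===== PORT A =====
-- list assignment row[i] = v; every index used by either port is nonnegative and in range, where this is exact
def pvSetI (xs : List String) (i : Int) (v : String) : List String :=
  if 0 ≤ i then xs.set i.toNat v else xs

-- inner 'for i in range(index+1, length): if row[i]=="." : next=i else: break'
def pvInnerA (row : List String) (next : Int) : List Int → Int
  | [] => next
  | i :: rest =>
    if PySem.List.pyGetD row i "" = "." then pvInnerA row i rest else next

-- one iteration of A's outer loop (row[index] read via pyGetD; index is always in range here)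
def pvStepA (length : Int) (row : List String) (index_from_start : Int) : List String :=
  let index := length - index_from_start - 1
  let elem := PySem.List.pyGetD row index ""
  let is_last_element : Bool := index == length - 1
  if elem = "O" ∧ is_last_element = false then
    let next_possible_index :=
      pvInnerA row index (PySem.List.pyRange (index + 1) length 1)
    if next_possible_index ≠ index then
      let a := PySem.List.pyGetD row next_possible_index ""
      let b := PySem.List.pyGetD row index ""
      pvSetI (pvSetI row index a) next_possible_index b
    else row
  else row

def move_stones_right (row : List String) : List String :=
  let length : Int := row.length
  (PySem.List.pyRange 0 length 1).foldl (pvStepA length) row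

-- ===== PORT B =====
-- one iteration of B's loop: c counts the '.' run immediately right of i
def pvStepB (st : List String × Int) (i : Int) : List String × Int :=
  let e := PySem.List.pyGetD st.1 i ""
  if e = "." then (st.1, st.2 + 1)
  else if e = "O" ∧ st.2 > 0 then
    (pvSetI (pvSetI st.1 i ".") (i + st.2) "O", st.2)
  else (st.1, 0)

def move_stones_right_alt (row : List String) : List String :=
  ((PySem.List.pyRange ((row.length : Int) - 1) (-1) (-1)).foldl pvStepB (row, 0)).1

-- ===== PRECONDITION & SPEC =====
def Spec_move_stones_right (row : List String) (out : List String) : Prop := out = move_stones_right_alt row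
instance (row : List String) (out : List String) : Decidable (Spec_move_stones_right row out) := by unfold Spec_move_stones_right; infer_instance

-- ===== CLAIM (what is proved, stated in full; the proofs are below) =====
def Claim_equal_move_stones_right : Prop := ∀ (row : List String), Dom_move_stones_right row → Spec_move_stones_right row (move_stones_right row)

-- ===== LEMMAS AND PROOFS =====

-- proof-side spec: slide a suffix right; returns (slid suffix, length of its leading '.' run)
def pvSlide : List String → List String × Nat
  | [] => ([], 0)
  | x :: xs =>
    let p := pvSlide xs
    if x = "." then (x :: p.1, p.2 + 1)
    else if x = "O" ∧ p.2 ≠ 0 then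
      (List.replicate p.2 "." ++ "O" :: p.1.drop p.2, p.2)
    else (x :: p.1, 0)

-- the slid suffix starts with exactly (pvSlide xs).2 dots, and then a non-dot (if anything)
theorem pvSlide_run (xs : List String) :
    ∃ rest, (pvSlide xs).1 = List.replicate (pvSlide xs).2 "." ++ rest ∧
      (∀ y ∈ rest.head?, y ≠ ".") := by
  induction xs with
  | nil => exact ⟨[], by simp [pvSlide]⟩
  | cons x xs ih =>
    obtain ⟨rest, hr, hh⟩ := ih
    by_cases hx : x = "."
    · refine ⟨rest, ?_, hh⟩
      simp [pvSlide, hx, List.replicate_succ, hr]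
    · by_cases hO : x = "O" ∧ (pvSlide xs).2 ≠ 0
      · refine ⟨"O" :: (pvSlide xs).1.drop (pvSlide xs).2, ?_, by simp⟩
        simp [pvSlide, hO]
      · refine ⟨x :: (pvSlide xs).1, ?_, by simpa using hx⟩
        simp [pvSlide, hx, hO]

theorem pvSlide_c_le (xs : List String) : (pvSlide xs).2 ≤ (pvSlide xs).1.length := by
  obtain ⟨rest, hr, -⟩ := pvSlide_run xs
  rw [hr]; simp

theorem pvSlide_length (xs : List String) : (pvSlide xs).1.length = xs.length := by
  induction xs with
  | nil => simp [pvSlide]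
  | cons x xs ih =>
    have hle := pvSlide_c_le xs
    by_cases hx : x = "."
    · simp [pvSlide, hx, ih]
    · by_cases hO : x = "O" ∧ (pvSlide xs).2 ≠ 0
      · simp [pvSlide, hO]; omega
      · simp [pvSlide, hx, hO, ih]

theorem pvSetI_natCast (xs : List String) (m : Nat) (v : String) :
    pvSetI xs (m : Int) v = xs.set m v := by
  simp [pvSetI]

theorem pyGetD_append_cons (P T : List String) (y d : String) :
    PySem.List.pyGetD (P ++ y :: T) (P.length : Int) d = y := by
  simp [PySem.List.pyGetD_natCast, List.getD]

theorem set_append_add (P F : List String) (t : Nat) (v : String) :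
    (P ++ F).set (P.length + t) v = P ++ F.set t v := by
  rw [List.set_append]; simp

-- A's inner scan over the '.'-run: returns next unchanged on an empty run, else the index of its last dot
theorem pvInnerA_run (c : Nat) (rest : List String)
    (hrest : ∀ y ∈ rest.head?, y ≠ ".") :
    ∀ (P : List String) (next : Int),
    pvInnerA (P ++ (List.replicate c "." ++ rest)) next
      (PySem.List.pyRange (P.length : Int) ((P.length : Int) + c + rest.length) 1)
      = if c = 0 then next else (P.length : Int) + c - 1 := by
  induction c with
  | zero =>
    intro P next
    cases rest with
    | nil => simp [pvInnerA, PySem.List.pyRange_one_eq_nil]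
    | cons y T =>
      have hy : y ≠ "." := hrest y (by simp)
      rw [PySem.List.pyRange_one_cons (by push_cast [List.length_cons]; omega)]
      simp [pvInnerA, hy]
  | succ c ih =>
    intro P next
    rw [PySem.List.pyRange_one_cons (by push_cast; omega)]
    have hget : PySem.List.pyGetD (P ++ (List.replicate (c+1) "." ++ rest)) (P.length : Int) "" = "." := by
      rw [List.replicate_succ]; exact pyGetD_append_cons P _ "." ""
    simp only [pvInnerA, hget, if_true]
    have hP : P ++ (List.replicate (c+1) "." ++ rest) = (P ++ ["."]) ++ (List.replicate c "." ++ rest) := by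
      simp [List.replicate_succ]
    have harg : (P.length : Int) + 1 = ((P ++ ["."]).length : Int) := by simp
    have hend : (P.length : Int) + (c+1 : Nat) + rest.length
        = ((P ++ ["."]).length : Int) + c + rest.length := by push_cast; simp; omega
    rw [hP, hend, harg, ih (P ++ ["."]) (P.length : Int)]
    by_cases hc : c = 0
    · simp [hc]
    · simp [hc]; omega

-- reading cur[p+c] inside the dot run (its last dot)
theorem pyGetD_run_last (pre rest : List String) (c : Nat) (hc : c ≠ 0) :
    PySem.List.pyGetD (pre ++ ("O" :: (List.replicate c "." ++ rest))) ((pre.length : Int) + c) "" = "." := by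
  obtain ⟨c', rfl⟩ : ∃ c', c = c' + 1 := ⟨c - 1, by omega⟩
  have hsplit : pre ++ ("O" :: (List.replicate (c'+1) "." ++ rest))
      = (pre ++ "O" :: List.replicate c' ".") ++ "." :: rest := by
    simp [List.replicate_succ']
  have hlen : ((pre.length : Int) + (c'+1 : Nat)) = (((pre ++ "O" :: List.replicate c' ".").length : Int)) := by
    simp
  rw [hsplit, hlen]
  exact pyGetD_append_cons _ rest "." ""

-- the double assignment both ports perform when a stone moves c places
theorem pvSwap_eval (pre rest : List String) (c : Nat) :
    pvSetI (pvSetI (pre ++ ("O" :: (List.replicate c "." ++ rest))) (pre.length : Int) ".")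
      ((pre.length : Int) + c) "O"
    = pre ++ (List.replicate c "." ++ "O" :: rest) := by
  have h1 : pvSetI (pre ++ ("O" :: (List.replicate c "." ++ rest))) (pre.length : Int) "."
      = pre ++ (List.replicate (c+1) "." ++ rest) := by
    rw [pvSetI_natCast]
    simp [List.replicate_succ]
  rw [h1]
  have hcast : ((pre.length : Int) + c) = ((pre.length + c : Nat) : Int) := by push_cast; ring
  rw [hcast, pvSetI_natCast, set_append_add pre (List.replicate (c+1) "." ++ rest) c "O"]
  congr 1
  have hsplit : List.replicate (c+1) "." ++ rest = List.replicate c "." ++ "." :: rest := by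
    simp [List.replicate_succ' (n := c)]
  rw [hsplit]
  simp

-- joint loop invariant: after k iterations both A's state and B's state are
-- 'untouched prefix ++ slid suffix', and B's counter is the suffix's leading-dot run
theorem pvInv (row : List String) :
    ∀ (k : Nat), k ≤ row.length →
    (PySem.List.pyRange 0 (k : Int) 1).foldl (pvStepA (row.length : Int)) row
        = row.take (row.length - k) ++ (pvSlide (row.drop (row.length - k))).1
    ∧ ((PySem.List.pyRange 0 (k : Int) 1).map (fun j => (row.length : Int) - 1 - j)).foldl pvStepB (row, 0)
        = (row.take (row.length - k) ++ (pvSlide (row.drop (row.length - k))).1,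
           ((pvSlide (row.drop (row.length - k))).2 : Int)) := by
  intro k
  induction k with
  | zero =>
    intro _
    simp [PySem.List.pyRange_one_eq_nil, pvSlide, List.take_of_length_le]
  | succ k ih =>
    intro hk1
    obtain ⟨ihA, ihB⟩ := ih (by omega)
    set n := row.length with hn
    set p := n - (k+1) with hpdef
    have hp : p < n := by omega
    have hnk : n - k = p + 1 := by omega
    rw [hnk] at ihA ihB
    have hdrop : row.drop p = row[p] :: row.drop (p+1) := List.drop_eq_getElem_cons (by omega)
    have htake : row.take (p+1) = row.take p ++ [row[p]] :=
      List.take_succ_eq_append_getElem (by omega)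
    set x := row[p] with hx
    set s := row.drop (p+1) with hs
    set S := (pvSlide s).1 with hSdef
    set c := (pvSlide s).2 with hcdef
    have hSlen : S.length = n - (p+1) := by rw [hSdef, pvSlide_length, hs, List.length_drop]
    have hcur : row.take (p+1) ++ S = row.take p ++ (x :: S) := by rw [htake]; simp
    have hplen : (row.take p).length = p := by rw [List.length_take]; omega
    have hplen' : ((p : Nat) : Int) = (((row.take p).length : Nat) : Int) := by rw [hplen]
    have hsucc : ((k+1 : Nat) : Int) = (k : Int) + 1 := by push_cast; ring
    rw [hsucc, PySem.List.pyRange_one_succ_right (by positivity), List.foldl_append,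
      List.map_append, List.foldl_append, ihA, ihB]
    simp only [List.foldl_cons, List.foldl_nil, List.map_cons, List.map_nil]
    have hidxB : (n : Int) - 1 - (k : Int) = (p : Int) := by omega
    rw [hidxB]
    have hgetp : PySem.List.pyGetD (row.take (p+1) ++ S) (p : Int) "" = x := by
      rw [hcur, hplen']
      exact pyGetD_append_cons (row.take p) S x ""
    have hslide : pvSlide (row.drop p)
        = if x = "." then (x :: S, c+1)
          else if x = "O" ∧ c ≠ 0 then (List.replicate c "." ++ "O" :: S.drop c, c)
          else (x :: S, 0) := by
      rw [hdrop]; rfl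
    obtain ⟨rest, hSr, hrh⟩ := pvSlide_run s
    rw [← hSdef, ← hcdef] at hSr
    have hlen1 : ((row.take (p+1)).length : Int) = (p : Int) + 1 := by
      rw [List.length_take]; omega
    -- evaluate A's step
    have hAstep :
        pvStepA (n : Int) (row.take (p+1) ++ S) (k : Int)
          = row.take p ++ (pvSlide (row.drop p)).1 := by
      have hidx : (n : Int) - (k : Int) - 1 = (p : Int) := by omega
      simp only [pvStepA, hidx, hgetp]
      by_cases hxO : x = "O"
      · by_cases hc0 : c = 0
        · -- no dot directly to the right: the stone does not move
          have hRd : pvSlide (row.drop p) = (x :: S, 0) := by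
            rw [hslide, if_neg (by simp [hxO]), if_neg (by simp [hc0])]
          rw [hRd]
          by_cases hlast : p + 1 = n
          · rw [if_neg (by simp; omega)]
            rw [hcur]
          · rw [if_pos ⟨hxO, by simp; omega⟩]
            have h2 : (n : Int) = ((row.take (p+1)).length : Int) + ((0 : Nat) : Int) + (rest.length : Int) := by
              have hSl : S.length = rest.length := by rw [hSr, hc0]; simp
              omega
            have hinner : pvInnerA (row.take (p+1) ++ S) (p : Int)
                (PySem.List.pyRange ((p : Int) + 1) (n : Int) 1) = (p : Int) := by
              rw [hSr, hc0, h2, ← hlen1]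
              have := pvInnerA_run 0 rest hrh (row.take (p+1)) (p : Int)
              simpa using this
            rw [hinner, if_neg (by simp), hcur]
        · -- the stone moves c places into the dot run
          have hcS : c ≤ S.length := by rw [hSr]; simp
          have hlast : p + 1 < n := by omega
          rw [if_pos ⟨hxO, by simp; omega⟩]
          have h2 : (n : Int) = ((row.take (p+1)).length : Int) + (c : Int) + (rest.length : Int) := by
            have hSl : S.length = c + rest.length := by rw [hSr]; simp
            omega
          have hinner : pvInnerA (row.take (p+1) ++ S) (p : Int)
              (PySem.List.pyRange ((p : Int) + 1) (n : Int) 1) = (p : Int) + (c : Int) := by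
            rw [hSr, h2, ← hlen1,
              pvInnerA_run c rest hrh (row.take (p+1)) (p : Int),
              if_neg hc0, hlen1]
            ring
          rw [hinner, if_pos (by omega)]
          have hcur2 : row.take (p+1) ++ S
              = row.take p ++ ("O" :: (List.replicate c "." ++ rest)) := by
            rw [hcur, hSr, hxO]
          have hga : PySem.List.pyGetD (row.take (p+1) ++ S) ((p : Int) + (c : Int)) "" = "." := by
            rw [hcur2, hplen']
            exact pyGetD_run_last (row.take p) rest c hc0
          have hRd : pvSlide (row.drop p)
              = (List.replicate c "." ++ "O" :: S.drop c, c) := by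
            rw [hslide, if_neg (by simp [hxO]), if_pos ⟨hxO, hc0⟩]
          rw [hga, hRd, hcur2, hplen', hxO, pvSwap_eval (row.take p) rest c]
          congr 2
          rw [hSr]
          simp
      · -- not a stone: nothing happens
        rw [if_neg (by simp [hxO])]
        by_cases hxd : x = "."
        · have hRd : pvSlide (row.drop p) = (x :: S, c + 1) := by rw [hslide, if_pos hxd]
          rw [hRd, hcur]
        · have hRd : pvSlide (row.drop p) = (x :: S, 0) := by
            rw [hslide, if_neg hxd, if_neg (by simp [hxO])]
          rw [hRd, hcur]
    -- evaluate B's step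
    have hBstep :
        pvStepB (row.take (p+1) ++ S, (c : Int)) (p : Int)
          = (row.take p ++ (pvSlide (row.drop p)).1, ((pvSlide (row.drop p)).2 : Int)) := by
      simp only [pvStepB, hgetp]
      by_cases hxd : x = "."
      · have hRd : pvSlide (row.drop p) = (x :: S, c + 1) := by rw [hslide, if_pos hxd]
        rw [if_pos hxd, hRd, hcur]
        simp
      · rw [if_neg hxd]
        by_cases hO : x = "O" ∧ (c : Int) > 0
        · rw [if_pos hO]
          have hc0 : c ≠ 0 := by
            have := hO.2
            omega
          have hcur2 : row.take (p+1) ++ S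
              = row.take p ++ ("O" :: (List.replicate c "." ++ rest)) := by
            rw [hcur, hSr, hO.1]
          have hRd : pvSlide (row.drop p)
              = (List.replicate c "." ++ "O" :: S.drop c, c) := by
            rw [hslide, if_neg (by simp [hO.1]), if_pos ⟨hO.1, hc0⟩]
          rw [hRd, hcur2, hplen', pvSwap_eval (row.take p) rest c]
          congr 3
          rw [hSr]
          simp
        · have hnotO : ¬(x = "O" ∧ c ≠ 0) := by
            rintro ⟨h1, h2⟩
            exact hO ⟨h1, by omega⟩
          have hRd : pvSlide (row.drop p) = (x :: S, 0) := by
            rw [hslide, if_neg hxd, if_neg hnotO]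
          rw [if_neg hO, hRd, hcur]
          simp
    rw [hAstep, hBstep]
    exact ⟨rfl, rfl⟩

-- ===== VERDICT (by name: the statement is the Claim_ definition above) =====
theorem move_stones_right_spec : Claim_equal_move_stones_right := by
  intro row _
  show (PySem.List.pyRange 0 ((row.length : Int)) 1).foldl (pvStepA (row.length : Int)) row
      = ((PySem.List.pyRange ((row.length : Int) - 1) (-1) (-1)).foldl pvStepB (row, 0)).1
  obtain ⟨hA, hB⟩ := pvInv row row.length le_rfl
  have hr : PySem.List.pyRange ((row.length : Int) - 1) (-1) (-1)
      = (PySem.List.pyRange 0 (row.length : Int) 1).map (fun j => (row.length : Int) - 1 - j) := by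
    rw [PySem.List.pyRange_neg_one, PySem.List.pyRange_one, List.map_map]
    have h1 : ((row.length : Int) - 1 - (-1)).toNat = ((row.length : Int) - 0).toNat := by omega
    rw [h1]
    exact List.map_congr_left (fun k _ => by simp)
  rw [hA, hr, hB]
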